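-- pv_equiv track=rewrite | github.com/lgarrison/adventofcode2025 | src/aoc/day08/__main__.py | pair_dists2
-- ===== SOURCE A (Python) =====
-- def pair_dists2(junctions: list[tuple[int, int, int]]) -> list[list[int]]:
--     dists: list[list[int]] = []
--     for i, (x1, y1, z1) in enumerate(junctions):
--         row: list[int] = []
--         for j, (x2, y2, z2) in enumerate(junctions):
--             dist = (x1 - x2) ** 2 + (y1 - y2) ** 2 + (z1 - z2) ** 2
--             row.append(dist)
--         dists.append(row)
--     return dists
-- ===== SOURCE B (Python) =====
-- def pair_dists2(junctions: list[tuple[int, int, int]]) -> list[list[int]]: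
--     # precompute squared norms once, then use |p-q|^2 = |p|^2 + |q|^2 - 2 p.q
--     sq = [x * x + y * y + z * z for x, y, z in junctions]
--     return [
--         [si + sj - 2 * (x1 * x2 + y1 * y2 + z1 * z2)
--          for (x2, y2, z2), sj in zip(junctions, sq)]
--         for (x1, y1, z1), si in zip(junctions, sq)
--     ]
-- ===== Notes on version B (the rewrite author's own statement) =====
-- stated objective: alternative
-- what changed: B precomputes per-point squared norms in one pass and fills the matrix via the Gram identity |p-q|^2 = |p|^2 + |q|^2 - 2 p.q instead of differencing coordinates per pair.
import Mathlib
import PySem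

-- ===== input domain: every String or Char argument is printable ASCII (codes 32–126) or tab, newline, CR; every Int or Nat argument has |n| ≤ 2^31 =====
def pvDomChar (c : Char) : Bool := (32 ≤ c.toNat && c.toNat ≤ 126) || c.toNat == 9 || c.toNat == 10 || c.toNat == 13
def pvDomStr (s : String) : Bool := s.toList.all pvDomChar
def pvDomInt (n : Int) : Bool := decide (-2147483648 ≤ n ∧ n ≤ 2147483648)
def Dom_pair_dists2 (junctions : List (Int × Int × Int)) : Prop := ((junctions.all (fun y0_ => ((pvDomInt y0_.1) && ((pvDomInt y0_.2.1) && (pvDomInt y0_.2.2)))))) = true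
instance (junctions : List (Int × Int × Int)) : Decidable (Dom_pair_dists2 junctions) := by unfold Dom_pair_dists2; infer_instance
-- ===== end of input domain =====

-- ===== PORT A =====
def pair_dists2 (junctions : List (Int × Int × Int)) : List (List Int) :=
  junctions.map (fun p1 =>
    junctions.map (fun p2 =>
      (p1.1 - p2.1) ^ 2 + (p1.2.1 - p2.2.1) ^ 2 + (p1.2.2 - p2.2.2) ^ 2))

-- ===== PORT B =====
-- B builds the matrix from precomputed squared norms and dot products (Gram identity); same cost, different shape.
def pair_dists2_alt (junctions : List (Int × Int × Int)) : List (List Int) :=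
  let sq := junctions.map (fun p => p.1 * p.1 + p.2.1 * p.2.1 + p.2.2 * p.2.2)
  (junctions.zip sq).map (fun q1 =>
    (junctions.zip sq).map (fun q2 =>
      q1.2 + q2.2 - 2 * (q1.1.1 * q2.1.1 + q1.1.2.1 * q2.1.2.1 + q1.1.2.2 * q2.1.2.2)))

-- ===== PRECONDITION & SPEC =====
def Spec_pair_dists2 (junctions : List (Int × Int × Int)) (out : List (List Int)) : Prop := out = pair_dists2_alt junctions
instance (junctions : List (Int × Int × Int)) (out : List (List Int)) : Decidable (Spec_pair_dists2 junctions out) := by unfold Spec_pair_dists2; infer_instance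

-- ===== CLAIM (what is proved, stated in full; the proofs are below) =====
def Claim_equal_pair_dists2 : Prop := ∀ (junctions : List (Int × Int × Int)), Dom_pair_dists2 junctions → Spec_pair_dists2 junctions (pair_dists2 junctions)

-- ===== LEMMAS AND PROOFS =====

-- ===== VERDICT (by name: the statement is the Claim_ definition above) =====
lemma pv_zip_sq (junctions : List (Int × Int × Int)) :
    junctions.zip (junctions.map (fun p => p.1 * p.1 + p.2.1 * p.2.1 + p.2.2 * p.2.2))
      = junctions.map (fun p => (p, p.1 * p.1 + p.2.1 * p.2.1 + p.2.2 * p.2.2)) := by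
  induction junctions with
  | nil => rfl
  | cons h t ih => simp [ih]

theorem pair_dists2_spec : Claim_equal_pair_dists2 := by
  intro junctions _
  unfold Spec_pair_dists2 pair_dists2 pair_dists2_alt
  simp only [pv_zip_sq, List.map_map]
  apply List.map_congr_left
  intro p1 _
  apply List.map_congr_left
  intro p2 _
  simp only [Function.comp]
  ring
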